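-- pv_equiv track=rewrite | github.com/zhangyu345293721/leetcode | src/leetcodepython/string/reverse_string2_541.py | get_reverse_string
-- ===== SOURCE A (Python) =====
-- def get_reverse_string(s: str, k: int) -> str:
--     '''
--         字符串反转
--     Args:
--         arr: 字符串
--     Returns:
--         反转后字符串
--     '''
--     list = []
--     sb = ''
--     number = len(s) // k
--     for i in range(number):
--         list.append(s[i * k:i * k + k])
--     if number * k < len(s):
--         list.append(s[number * k:len(s)])
--     for i in range(len(list)):
--         if i % 2 == 0:
--             sb += list[i][::-1]
--         else:
--             sb += list[i]
--     return sb
-- ===== SOURCE B (Python) =====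
-- def get_reverse_string(s: str, k: int) -> str:
--     parts = []
--     for i in range(0, len(s), 2 * k):
--         parts.append(s[i:i + k][::-1] + s[i + k:i + 2 * k])
--     return ''.join(parts)
-- ===== Notes on version B (the rewrite author's own statement) =====
-- stated objective: simpler
-- what changed: Replaces A's build-a-chunk-list pass plus a second index/parity scan with a single strided loop over range(0, len(s), 2*k) that appends the reversed k-slice and the untouched next k-slice directly; slicing handles the final partial block, so the intermediate list and the parity test disappear.
import Mathlib
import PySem

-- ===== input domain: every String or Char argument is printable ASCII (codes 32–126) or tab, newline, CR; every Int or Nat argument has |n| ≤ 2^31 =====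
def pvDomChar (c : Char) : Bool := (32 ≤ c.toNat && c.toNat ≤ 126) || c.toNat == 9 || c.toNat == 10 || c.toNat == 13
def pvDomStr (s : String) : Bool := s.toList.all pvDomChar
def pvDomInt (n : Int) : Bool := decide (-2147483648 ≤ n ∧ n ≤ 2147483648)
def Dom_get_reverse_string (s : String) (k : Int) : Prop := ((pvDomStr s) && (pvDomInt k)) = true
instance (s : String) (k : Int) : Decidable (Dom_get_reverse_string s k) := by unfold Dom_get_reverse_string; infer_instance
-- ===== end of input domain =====

-- B replaces A's chunk-list-then-parity-scan with a single strided loop over range(0, len(s), 2*k)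
-- appending the reversed k-slice and the untouched next k-slice (objective: simpler).

-- ===== PORT A =====
def get_reverse_string (s : String) (k : Int) : String :=
  let cs := s.toList
  -- number = len(s) // k
  let number := PySem.Int.floordiv (PySem.Str.len s) k
  -- for i in range(number): list.append(s[i*k : i*k+k])
  let lst := (PySem.List.pyRange 0 number 1).foldl
    (fun acc i => acc ++ [PySem.List.slice cs (some (i * k)) (some (i * k + k))]) []
  -- if number*k < len(s): list.append(s[number*k : len(s)])
  let lst := if number * k < PySem.Str.len s then
      lst ++ [PySem.List.slice cs (some (number * k)) (some (PySem.Str.len s))]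
    else lst
  -- for i in range(len(list)): sb += list[i][::-1] if i % 2 == 0 else list[i]
  let sb := (PySem.List.pyRange 0 (lst.length : Int) 1).foldl
    (fun acc i =>
      if PySem.Int.mod i 2 = 0 then
        acc ++ ((PySem.List.slice? (PySem.List.pyGetD lst i []) none none (-1)).getD [])
      else
        acc ++ PySem.List.pyGetD lst i []) []
  String.ofList sb

-- ===== PORT B =====
def get_reverse_string_alt (s : String) (k : Int) : String :=
  let cs := s.toList
  -- for i in range(0, len(s), 2*k): parts.append(s[i:i+k][::-1] + s[i+k:i+2*k])
  let parts := (PySem.List.pyRange 0 (PySem.Str.len s) (2 * k)).foldl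
    (fun acc i =>
      acc ++ [((PySem.List.slice? (PySem.List.slice cs (some i) (some (i + k))) none none (-1)).getD [])
                ++ PySem.List.slice cs (some (i + k)) (some (i + 2 * k))]) []
  -- return ''.join(parts)
  String.ofList parts.flatten

-- ===== PRECONDITION & SPEC =====
-- Pre_ excludes exactly k = 0, where Python A raises ZeroDivisionError (len(s) // 0).
def Pre_get_reverse_string (s : String) (k : Int) : Prop := k ≠ 0
instance (s : String) (k : Int) : Decidable (Pre_get_reverse_string s k) := by unfold Pre_get_reverse_string; infer_instance
def pvWitness_get_reverse_string : String × Int := ("abcdefg", 2)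

def Spec_get_reverse_string (s : String) (k : Int) (out : String) : Prop := out = get_reverse_string_alt s k
instance (s : String) (k : Int) (out : String) : Decidable (Spec_get_reverse_string s k out) := by unfold Spec_get_reverse_string; infer_instance

-- ===== CLAIM (what is proved, stated in full; the proofs are below) =====
def Claim_equal_get_reverse_string : Prop := ∀ (s : String) (k : Int), Dom_get_reverse_string s k → Pre_get_reverse_string s k → Spec_get_reverse_string s k (get_reverse_string s k)

-- ===== LEMMAS AND PROOFS =====

-- general-step pyRange facts (steps other than ±1 have no induction forms in the prelude)
theorem pvRange_pos_nil {a b s : Int} (hs : 0 < s) (h : b ≤ a) :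
    PySem.List.pyRange a b s = [] := by
  rw [PySem.List.pyRange_of_pos _ _ hs]
  simp [show ¬ a < b by omega]

theorem pvRange_neg_nil {a b s : Int} (hs : s < 0) (h : a ≤ b) :
    PySem.List.pyRange a b s = [] := by
  unfold PySem.List.pyRange
  simp [show s ≠ 0 by omega, show ¬ 0 < s by omega, show ¬ b < a by omega]

theorem pvRange_pos_cons {a b s : Int} (hs : 0 < s) (hab : a < b) :
    PySem.List.pyRange a b s = a :: PySem.List.pyRange (a + s) b s := by
  rw [PySem.List.pyRange_of_pos _ _ hs, PySem.List.pyRange_of_pos _ _ hs]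
  have h1 : b - a + s - 1 = (b - a - 1) + 1 * s := by ring
  have h2 : ((b - a - 1) + 1 * s) / s = (b - a - 1) / s + 1 :=
    Int.add_mul_ediv_right _ _ (by omega)
  have hq0 : 0 ≤ (b - a - 1) / s := Int.ediv_nonneg (by omega) (by omega)
  have hcnt : ((b - a + s - 1) / s).toNat = ((b - a - 1) / s).toNat + 1 := by
    rw [h1, h2]; omega
  by_cases hb : a + s < b
  · have h3 : b - (a + s) + s - 1 = b - a - 1 := by ring
    simp only [if_pos hab, if_pos hb, h3, hcnt, List.range_succ_eq_map, List.map_cons,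
      List.map_map]
    congr 1
    · push_cast; ring
    · apply List.map_congr_left; intro x _; simp [Function.comp, Nat.succ_eq_add_one]; ring
  · have hz : (b - a - 1) / s = 0 := Int.ediv_eq_zero_of_lt (by omega) (by omega)
    simp only [if_pos hab, if_neg hb, hcnt, hz, Int.toNat_zero, List.range_succ_eq_map,
      List.range_zero, List.map_nil, List.map_cons]
    simp

theorem pvRange_pos_shift {a b s : Int} (hs : 0 < s) :
    PySem.List.pyRange (a + s) b s = (PySem.List.pyRange a (b - s) s).map (· + s) := by
  rw [PySem.List.pyRange_of_pos _ _ hs, PySem.List.pyRange_of_pos _ _ hs]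
  have h3 : b - (a + s) + s - 1 = b - s - a + s - 1 := by ring
  have hiff : (a + s < b) ↔ (a < b - s) := by omega
  by_cases hb : a + s < b
  · simp only [if_pos hb, if_pos (hiff.mp hb), h3, List.map_map]
    apply List.map_congr_left; intro x _; simp [Function.comp]; ring
  · simp [if_neg hb, if_neg (fun h => hb (hiff.mpr h))]

-- the k-chunking of a list, peeled one chunk at a time (chunk size m+1 > 0)
def pvChunk (m : Nat) : List Char → List (List Char)
  | [] => []
  | c :: t => ((c :: t).take (m + 1)) :: pvChunk m ((c :: t).drop (m + 1))
termination_by l => l.length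
decreasing_by simp [List.length_drop]

-- alternately reverse chunks, starting with "reverse" when the flag is true
def pvAltcat : Bool → List (List Char) → List Char
  | _, [] => []
  | true, c :: t => c.reverse ++ pvAltcat false t
  | false, c :: t => c ++ pvAltcat true t

-- the common normal form: reverse the first m+1 chars, keep the next m+1, recurse
def pvSpec (m : Nat) : List Char → List Char
  | [] => []
  | c :: t =>
      ((c :: t).take (m + 1)).reverse ++ (((c :: t).drop (m + 1)).take (m + 1))
        ++ pvSpec m ((c :: t).drop (2 * (m + 1)))
termination_by l => l.length
decreasing_by simp [List.length_drop]; omega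

-- A's first loop plus remainder append, written as a map over Nat indices
def pvChunksA (K : Nat) (cs : List Char) : List (List Char) :=
  (List.range (cs.length / K)).map (fun i => (cs.drop (i * K)).take K)
    ++ (if cs.length / K * K < cs.length then [cs.drop (cs.length / K * K)] else [])

-- B's parts list, on the char-list level
def pvBparts (k : Int) (cs : List Char) : List (List Char) :=
  (PySem.List.pyRange 0 (cs.length : Int) (2 * k)).foldl
    (fun acc i =>
      acc ++ [((PySem.List.slice? (PySem.List.slice cs (some i) (some (i + k))) none none (-1)).getD [])
                ++ PySem.List.slice cs (some (i + k)) (some (i + 2 * k))]) []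

theorem pvAlt_eq_parts (s : String) (k : Int) :
    get_reverse_string_alt s k = String.ofList (pvBparts k s.toList).flatten := by
  simp [get_reverse_string_alt, pvBparts, PySem.Str.len_eq]

-- shifting a slice past a dropped prefix
theorem pvSlice_drop (cs : List Char) (d : Nat) {a b : Int} (ha : 0 ≤ a) (hb : 0 ≤ b) :
    PySem.List.slice (cs.drop d) (some a) (some b)
      = PySem.List.slice cs (some (a + (d : Int))) (some (b + (d : Int))) := by
  rw [PySem.List.slice_toNat _ ha hb, PySem.List.slice_toNat _ (by omega) (by omega)]
  rw [List.drop_drop]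
  congr 1
  · omega
  · congr 1; omega

-- B's strided loop computes pvSpec
theorem pvB_eq_spec (m : Nat) (cs : List Char) :
    (pvBparts ((m : Int) + 1) cs).flatten = pvSpec m cs := by
  have hk2 : (0 : Int) < 2 * ((m : Int) + 1) := by positivity
  cases cs with
  | nil =>
    rw [pvBparts, pvRange_pos_nil hk2 (by simp)]
    simp [pvSpec]
  | cons c t =>
    rw [pvBparts, PySem.List.foldl_append_singleton_eq_map, List.nil_append]
    have hlen : (0 : Int) < (((c :: t).length : Nat) : Int) := by
      simp only [List.length_cons]; push_cast; omega
    rw [pvRange_pos_cons hk2 hlen, pvRange_pos_shift hk2, List.map_cons, List.map_map,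
      List.flatten_cons]
    have hhead : (PySem.List.slice? (PySem.List.slice (c :: t) (some 0)
          (some (0 + ((m : Int) + 1)))) none none (-1)).getD []
          ++ PySem.List.slice (c :: t) (some (0 + ((m : Int) + 1)))
              (some (0 + 2 * ((m : Int) + 1)))
        = ((c :: t).take (m + 1)).reverse ++ ((c :: t).drop (m + 1)).take (m + 1) := by
      rw [PySem.List.slice?_none_none_neg_one, Option.getD_some]
      rw [show (0 : Int) + ((m : Int) + 1) = ((m + 1 : Nat) : Int) by push_cast; ring]
      rw [show (0 : Int) + 2 * ((m : Int) + 1) = ((2 * (m + 1) : Nat) : Int) by push_cast; ring]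
      rw [PySem.List.slice_natCast]
      rw [PySem.List.slice_zero_start, PySem.List.slice_to_natCast]
      simp [show 2 * (m + 1) - (m + 1) = m + 1 by omega]
    rw [hhead]
    have htail : (List.map ((fun i =>
          (PySem.List.slice? (PySem.List.slice (c :: t) (some i) (some (i + ((m : Int) + 1)))) none none (-1)).getD []
            ++ PySem.List.slice (c :: t) (some (i + ((m : Int) + 1))) (some (i + 2 * ((m : Int) + 1)))) ∘
          (· + 2 * ((m : Int) + 1)))
          (PySem.List.pyRange 0 ((((c :: t).length : Nat) : Int) - 2 * ((m : Int) + 1)) (2 * ((m : Int) + 1)))).flatten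
        = pvSpec m ((c :: t).drop (2 * (m + 1))) := by
      by_cases hbig : 2 * (m + 1) ≤ (c :: t).length
      · have hlen2 : ((((c :: t).drop (2 * (m + 1))).length : Nat) : Int)
            = (((c :: t).length : Nat) : Int) - 2 * ((m : Int) + 1) := by
          simp only [List.length_drop]
          push_cast [hbig]
          ring
        rw [← pvB_eq_spec m ((c :: t).drop (2 * (m + 1)))]
        rw [pvBparts, PySem.List.foldl_append_singleton_eq_map, List.nil_append, hlen2]
        congr 1
        apply List.map_congr_left
        intro i hi
        have hi0 : 0 ≤ i := by
          have := (PySem.List.mem_pyRange_iff_of_pos hk2 i).mp hi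
          omega
        simp only [Function.comp]
        rw [pvSlice_drop _ _ hi0 (by omega), pvSlice_drop _ _ (by omega) (by omega)]
        rw [PySem.List.slice?_none_none_neg_one, PySem.List.slice?_none_none_neg_one,
          Option.getD_some, Option.getD_some]
        push_cast
        ring_nf
      · rw [pvRange_pos_nil hk2 (by omega)]
        rw [List.drop_eq_nil_of_le (by omega)]
        simp [pvSpec]
    rw [htail, pvSpec]
termination_by cs.length
decreasing_by simp [List.length_drop] <;> omega

-- A's chunk list is the recursive chunking
theorem pvChunksA_eq (m : Nat) (cs : List Char) :
    pvChunksA (m + 1) cs = pvChunk m cs := by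
  cases cs with
  | nil => simp [pvChunksA, pvChunk]
  | cons c t =>
    rw [pvChunk]
    by_cases h : m + 1 ≤ (c :: t).length
    · have hq : (c :: t).length / (m + 1) = ((c :: t).length - (m + 1)) / (m + 1) + 1 :=
        Nat.div_eq_sub_div (by omega) h
      have hlen' : ((c :: t).drop (m + 1)).length = (c :: t).length - (m + 1) := by
        simp
      rw [pvChunksA, hq, List.range_succ_eq_map, List.map_cons, List.cons_append]
      rw [← pvChunksA_eq m ((c :: t).drop (m + 1))]
      rw [pvChunksA, hlen']
      congr 1
      · simp
      congr 1
      · rw [List.map_map]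
        apply List.map_congr_left
        intro i _
        simp only [Function.comp, List.drop_drop]
        congr 2
        simp [Nat.succ_mul]
        omega
      · set n := (c :: t).length with hn
        set q := (n - (m + 1)) / (m + 1) with hqdef
        have hmul : (q + 1) * (m + 1) = q * (m + 1) + (m + 1) := by ring
        by_cases hc : q * (m + 1) < n - (m + 1)
        · rw [if_pos (by rw [hmul]; omega), if_pos hc, List.drop_drop]
          have he : (q + 1) * (m + 1) = m + 1 + q * (m + 1) := by ring
          rw [he]
        · rw [if_neg (by rw [hmul]; omega), if_neg hc]
    · have hq : (c :: t).length / (m + 1) = 0 := Nat.div_eq_of_lt (by omega)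
      have h1 : (c :: t).take (m + 1) = c :: t := List.take_of_length_le (by omega)
      have h2 : (c :: t).drop (m + 1) = ([] : List Char) := List.drop_eq_nil_of_le (by omega)
      rw [pvChunksA, hq]
      simp [h1, h2, pvChunk]
termination_by cs.length
decreasing_by simp [List.length_drop]

-- alternating concatenation of the chunks is pvSpec
theorem pvAltcat_chunk (m : Nat) (cs : List Char) :
    pvAltcat true (pvChunk m cs) = pvSpec m cs := by
  cases cs with
  | nil => simp [pvChunk, pvSpec, pvAltcat]
  | cons c t =>
    rw [pvChunk, pvSpec]
    cases hd : (c :: t).drop (m + 1) with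
    | nil =>
      have h2 : (c :: t).drop (2 * (m + 1)) = [] := by
        apply List.drop_eq_nil_of_le
        have := congrArg List.length hd
        simp [List.length_cons] at this ⊢
        omega
      rw [h2]
      simp [pvAltcat, pvChunk, pvSpec]
    | cons d u =>
      have h2 : (c :: t).drop (2 * (m + 1)) = (d :: u).drop (m + 1) := by
        rw [show 2 * (m + 1) = (m + 1) + (m + 1) by ring, ← List.drop_drop, hd]
      rw [h2, pvChunk]
      simp only [pvAltcat]
      rw [pvAltcat_chunk m ((d :: u).drop (m + 1))]
      simp [List.append_assoc]
termination_by cs.length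
decreasing_by
  have := congrArg List.length hd
  simp [List.length_drop, List.length_cons] at this ⊢
  omega

theorem pvLoop2Aux (xs : List (List Char)) (suf pre : List (List Char))
    (h : xs = pre ++ suf) (acc : List Char) :
    (PySem.List.pyRange (pre.length : Int) (xs.length : Int) 1).foldl
      (fun acc i =>
        if PySem.Int.mod i 2 = 0 then
          acc ++ ((PySem.List.slice? (PySem.List.pyGetD xs i []) none none (-1)).getD [])
        else
          acc ++ PySem.List.pyGetD xs i []) acc
      = acc ++ pvAltcat (pre.length % 2 == 0) suf := by
  induction suf generalizing pre acc with
  | nil =>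
    subst h
    rw [List.append_nil, PySem.List.pyRange_one_eq_nil (le_refl _)]
    cases hb : (pre.length % 2 == 0) <;> simp [pvAltcat]
  | cons c suf ih =>
    subst h
    have hlen : ((pre.length : Int)) < (((pre ++ c :: suf).length : Nat) : Int) := by
      simp only [List.length_append, List.length_cons]; push_cast; omega
    rw [PySem.List.pyRange_one_cons hlen]
    simp only [List.foldl_cons]
    have hget : PySem.List.pyGetD (pre ++ c :: suf) ((pre.length : Int)) [] = c := by
      rw [PySem.List.pyGetD_natCast, List.getD_eq_getElem?_getD]
      simp
    have hm : PySem.Int.mod ((pre.length : Int)) 2 = ((pre.length % 2 : Nat) : Int) := by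
      exact_mod_cast PySem.Int.mod_natCast pre.length 2
    have hstep : ((pre.length : Int) + 1) = (((pre ++ [c]).length : Nat) : Int) := by
      simp
    have ih' := fun acc' => ih (pre ++ [c]) (by simp) acc'
    simp only [List.length_append, List.length_cons] at ih' ⊢
    by_cases hp : pre.length % 2 = 0
    · rw [if_pos (by rw [hm]; exact_mod_cast congrArg (Nat.cast : Nat → Int) hp)]
      rw [hget, PySem.List.slice?_none_none_neg_one, Option.getD_some, hstep]
      simp only [List.length_append, List.length_cons, List.length_nil] at ih' ⊢
      rw [ih' (acc ++ c.reverse)]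
      have h1 : ((pre.length + (0 + 1)) % 2 == 0) = false := by
        simp; omega
      have h2 : (pre.length % 2 == 0) = true := by simp [hp]
      rw [h1, h2]
      simp [pvAltcat]
    · rw [if_neg (by rw [hm]; intro hc; exact hp (by exact_mod_cast hc))]
      rw [hget, hstep]
      simp only [List.length_append, List.length_cons, List.length_nil] at ih' ⊢
      rw [ih' (acc ++ c)]
      have h1 : ((pre.length + (0 + 1)) % 2 == 0) = true := by
        simp; omega
      have h2 : (pre.length % 2 == 0) = false := by simp [hp]
      rw [h1, h2]
      simp [pvAltcat]

theorem pvLoop2 (xs : List (List Char)) :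
    (PySem.List.pyRange 0 (xs.length : Int) 1).foldl
      (fun acc i =>
        if PySem.Int.mod i 2 = 0 then
          acc ++ ((PySem.List.slice? (PySem.List.pyGetD xs i []) none none (-1)).getD [])
        else
          acc ++ PySem.List.pyGetD xs i []) []
      = pvAltcat true xs := by
  have := pvLoop2Aux xs xs [] (by simp) []
  simpa using this

-- A on a positive k = m+1 computes altcat of the chunk list
theorem pvA_eq (m : Nat) (s : String) :
    get_reverse_string s ((m : Int) + 1)
      = String.ofList (pvAltcat true (pvChunksA (m + 1) s.toList)) := by
  have hc1 : ((m : Int) + 1) = ((m + 1 : Nat) : Int) := by push_cast; ring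
  simp only [get_reverse_string, PySem.Str.len_eq]
  rw [hc1, PySem.Int.floordiv_natCast, PySem.List.pyRange_zero_natCast,
    PySem.List.foldl_append_singleton_eq_map, List.nil_append, List.map_map]
  have hmapf : List.map ((fun i => PySem.List.slice s.toList (some (i * ((m + 1 : Nat) : Int)))
        (some (i * ((m + 1 : Nat) : Int) + ((m + 1 : Nat) : Int)))) ∘ fun k : Nat => ((k : Nat) : Int))
        (List.range (s.toList.length / (m + 1)))
      = List.map (fun i => (s.toList.drop (i * (m + 1))).take (m + 1))
        (List.range (s.toList.length / (m + 1))) := by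
    apply List.map_congr_left
    intro i _
    simp only [Function.comp]
    rw [show ((i : Nat) : Int) * ((m + 1 : Nat) : Int) = ((i * (m + 1) : Nat) : Int) by
          push_cast; ring,
        PySem.List.slice_natCast_add]
  rw [hmapf]
  by_cases hcnat : s.toList.length / (m + 1) * (m + 1) < s.toList.length
  · have hci : ((s.toList.length / (m + 1) : Nat) : Int) * ((m + 1 : Nat) : Int)
        < ((s.toList.length : Nat) : Int) := by exact_mod_cast hcnat
    rw [if_pos hci]
    have hrem : PySem.List.slice s.toList
          (some (((s.toList.length / (m + 1) : Nat) : Int) * ((m + 1 : Nat) : Int)))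
          (some ((s.toList.length : Nat) : Int))
        = s.toList.drop (s.toList.length / (m + 1) * (m + 1)) := by
      rw [show ((s.toList.length / (m + 1) : Nat) : Int) * ((m + 1 : Nat) : Int)
            = ((s.toList.length / (m + 1) * (m + 1) : Nat) : Int) by push_cast; ring,
          PySem.List.slice_natCast]
      exact List.take_of_length_le (by simp)
    rw [hrem]
    have hfinal : List.map (fun i => (s.toList.drop (i * (m + 1))).take (m + 1))
          (List.range (s.toList.length / (m + 1)))
          ++ [s.toList.drop (s.toList.length / (m + 1) * (m + 1))]
        = pvChunksA (m + 1) s.toList := by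
      rw [pvChunksA, if_pos hcnat]
    rw [hfinal, pvLoop2]
  · have hci : ¬ (((s.toList.length / (m + 1) : Nat) : Int) * ((m + 1 : Nat) : Int)
        < ((s.toList.length : Nat) : Int)) := by
      intro hx
      exact hcnat (by exact_mod_cast hx)
    rw [if_neg hci]
    have hfinal : List.map (fun i => (s.toList.drop (i * (m + 1))).take (m + 1))
          (List.range (s.toList.length / (m + 1)))
        = pvChunksA (m + 1) s.toList := by
      rw [pvChunksA, if_neg hcnat, List.append_nil]
    rw [hfinal, pvLoop2]

-- negative k: both return the empty string
theorem pvA_neg (s : String) (k : Int) (hk : k < 0) : get_reverse_string s k = "" := by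
  simp only [get_reverse_string, PySem.Str.len_eq]
  have h1 := PySem.Int.floordiv_mul_add_mod ((s.toList.length : Nat) : Int) k
  have h2 := (PySem.Int.mod_neg_bounds ((s.toList.length : Nat) : Int) hk).2
  have hn : (0 : Int) ≤ ((s.toList.length : Nat) : Int) := by positivity
  have hnum : PySem.Int.floordiv ((s.toList.length : Nat) : Int) k ≤ 0 := by
    by_contra hpos
    have hpos' : 0 < PySem.Int.floordiv ((s.toList.length : Nat) : Int) k := by omega
    have := mul_neg_of_pos_of_neg hpos' hk
    omega
  rw [PySem.List.pyRange_one_eq_nil hnum]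
  simp only [List.foldl_nil]
  rw [if_neg (by omega)]
  simp only [List.length_nil, Nat.cast_zero]
  rw [PySem.List.pyRange_one_eq_nil (le_refl 0)]
  rfl

theorem pvB_neg (s : String) (k : Int) (hk : k < 0) : get_reverse_string_alt s k = "" := by
  rw [pvAlt_eq_parts]
  rw [pvBparts, pvRange_neg_nil (by omega) (by positivity)]
  rfl

-- ===== VERDICT (by name: the statement is the Claim_ definition above) =====
theorem get_reverse_string_spec : Claim_equal_get_reverse_string := by
  intro s k _ hk
  unfold Spec_get_reverse_string
  rcases lt_trichotomy k 0 with h | h | h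
  · rw [pvA_neg s k h, pvB_neg s k h]
  · exact absurd h hk
  · obtain ⟨m, hm⟩ : ∃ m : Nat, k = (m : Int) + 1 := ⟨(k - 1).toNat, by omega⟩
    subst hm
    rw [pvA_eq, pvAlt_eq_parts, pvChunksA_eq, pvAltcat_chunk]
    have : ((m : Int) + 1) = ((m + 1 : Nat) : Int) := by push_cast; ring
    rw [this] at *
    rw [show ((m + 1 : Nat) : Int) = (m : Int) + 1 by push_cast; ring, pvB_eq_spec]
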